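-- pv_equiv track=rewrite | github.com/robayet007/telegon-like-bot | bot.py | _collect_legacy_branch_descendants
-- ===== SOURCE A (Python) =====
-- def _collect_legacy_branch_descendants(user_managers: dict[int, int], root_user_id: int) -> set[int]:
--     """Collect one user's full subtree from the legacy shared hierarchy."""
--     descendants = set()
--     queue = [root_user_id]
--
--     while queue:
--         current_user_id = queue.pop(0)
--         if current_user_id in descendants:
--             continue
--         descendants.add(current_user_id)
--         queue.extend(
--             user_id
--             for user_id, manager_id in user_managers.items()
--             if manager_id == current_user_id
--         )
--
--     return descendants
-- ===== SOURCE B (Python) =====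
-- def _collect_legacy_branch_descendants(user_managers: dict[int, int], root_user_id: int) -> set[int]:
--     """Collect one user's full subtree from the legacy shared hierarchy.
--
--     Alternative strategy: build the manager -> direct-reports index once, then
--     walk the tree level by level (frontier BFS): each round visits a whole
--     frontier and gathers the next one, with no per-node scan of the dict and
--     no list.pop(0).
--     """
--     children: dict[int, list[int]] = {}
--     for user_id, manager_id in user_managers.items():
--         children.setdefault(manager_id, []).append(user_id)
--
--     descendants = set()
--     frontier = [root_user_id]
--     while frontier:
--         next_frontier = []
--         for u in frontier:
--             if u not in descendants:
--                 descendants.add(u)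
--                 next_frontier.extend(children.get(u, []))
--         frontier = next_frontier
--     return descendants
-- ===== Notes on version B (the rewrite author's own statement) =====
-- stated objective: alternative
-- what changed: B precomputes a manager->children index in one pass and then traverses level-by-level (frontier BFS over whole levels), replacing A's per-popped-node linear scan of the entire dict and its list.pop(0).
import Mathlib
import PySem

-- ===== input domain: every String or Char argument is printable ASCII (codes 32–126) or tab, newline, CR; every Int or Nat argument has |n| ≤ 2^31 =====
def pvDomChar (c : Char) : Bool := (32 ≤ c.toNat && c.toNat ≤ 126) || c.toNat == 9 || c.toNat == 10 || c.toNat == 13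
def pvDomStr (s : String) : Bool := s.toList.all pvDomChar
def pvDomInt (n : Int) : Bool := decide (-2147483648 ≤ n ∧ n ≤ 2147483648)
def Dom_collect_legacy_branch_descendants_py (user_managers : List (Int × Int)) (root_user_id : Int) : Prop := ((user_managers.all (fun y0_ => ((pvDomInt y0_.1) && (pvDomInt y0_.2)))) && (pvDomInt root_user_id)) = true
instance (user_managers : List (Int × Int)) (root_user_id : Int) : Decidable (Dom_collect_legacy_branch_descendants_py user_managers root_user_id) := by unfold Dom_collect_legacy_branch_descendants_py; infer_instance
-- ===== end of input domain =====

-- B builds a manager->children index once and traverses the tree level by level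
-- (frontier BFS), replacing A's per-popped-node scan of the whole dict and pop(0).

-- ===== PORT A =====
-- A's while-loop: pop the queue's front, skip visited, add to the set, enqueue every
-- user_id whose manager_id == current (a full scan of the dict items).  The Nat fuel
-- only makes the recursion total: each pop either consumes a queue entry that was
-- enqueued at most once per dict item (plus the root), so user_managers.length + 1
-- pops always suffice and the fuel never runs out (proved below).
def pvLoopA (items : List (Int × Int)) : Nat → PySem.Set Int → List Int → PySem.Set Int
  | _, descendants, [] => descendants
  | 0, descendants, _ => descendants
  | fuel + 1, descendants, current :: rest =>
    if PySem.Set.contains descendants current then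
      pvLoopA items fuel descendants rest
    else
      pvLoopA items fuel (PySem.Set.add descendants current)
        (rest ++ (items.filter (fun p => p.2 == current)).map (fun p => p.1))

def collect_legacy_branch_descendants_py (user_managers : List (Int × Int)) (root_user_id : Int) : List Int :=
  pvLoopA (PySem.Dict.ofList user_managers).items (user_managers.length + 1)
    PySem.Set.empty [root_user_id]

-- ===== PORT B =====
-- children.setdefault(manager_id, []).append(user_id) over the dict items
def pvChildMap (items : List (Int × Int)) : PySem.Dict Int (List Int) :=
  items.foldl (fun d p => d.modify p.2 [] (fun l => l ++ [p.1])) PySem.Dict.empty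

-- the inner 'for u in frontier' loop: visit the level, gathering the next frontier
def pvLevelStep (children : PySem.Dict Int (List Int))
    (descendants : PySem.Set Int) (frontier : List Int) : PySem.Set Int × List Int :=
  frontier.foldl
    (fun st u =>
      if PySem.Set.contains st.1 u then st
      else (PySem.Set.add st.1 u, st.2 ++ children.getD u []))
    (descendants, [])

-- the outer 'while frontier' loop; the same kind of fuel guard makes it total
def pvLevels (children : PySem.Dict Int (List Int)) :
    Nat → PySem.Set Int → List Int → PySem.Set Int
  | _, descendants, [] => descendants
  | 0, descendants, _ => descendants
  | fuel + 1, descendants, frontier =>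
    let st := pvLevelStep children descendants frontier
    pvLevels children fuel st.1 st.2

def collect_legacy_branch_descendants_py_alt (user_managers : List (Int × Int)) (root_user_id : Int) : List Int :=
  pvLevels (pvChildMap (PySem.Dict.ofList user_managers).items) (user_managers.length + 1)
    PySem.Set.empty [root_user_id]

-- ===== PRECONDITION & SPEC =====
def Spec_collect_legacy_branch_descendants_py (user_managers : List (Int × Int)) (root_user_id : Int) (out : List Int) : Prop := out = collect_legacy_branch_descendants_py_alt user_managers root_user_id
instance (user_managers : List (Int × Int)) (root_user_id : Int) (out : List Int) : Decidable (Spec_collect_legacy_branch_descendants_py user_managers root_user_id out) := by unfold Spec_collect_legacy_branch_descendants_py; infer_instance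

-- ===== CLAIM (what is proved, stated in full; the proofs are below) =====
def Claim_equal_collect_legacy_branch_descendants_py : Prop := ∀ (user_managers : List (Int × Int)) (root_user_id : Int), Dom_collect_legacy_branch_descendants_py user_managers root_user_id → Spec_collect_legacy_branch_descendants_py user_managers root_user_id (collect_legacy_branch_descendants_py user_managers root_user_id)

-- ===== LEMMAS AND PROOFS =====

-- number of dict items whose manager is not yet visited
def pvCnt (items : List (Int × Int)) (d : PySem.Set Int) : Nat :=
  (items.filter (fun p => !(PySem.Set.contains d p.2))).length

-- A's termination measure: queue length + unvisited-manager items; it drops by exactly 1 per pop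
def pvM (items : List (Int × Int)) (d : PySem.Set Int) (q : List Int) : Nat :=
  q.length + pvCnt items d

-- A's fold-shaped level body (pvLevelStep with the children-map lookup spelled out)
def pvGA (items : List (Int × Int)) (st : PySem.Set Int × List Int) (u : Int) :
    PySem.Set Int × List Int :=
  if PySem.Set.contains st.1 u then st
  else (PySem.Set.add st.1 u, st.2 ++ (items.filter (fun p => p.2 == u)).map (fun p => p.1))

lemma pvLoopA_nil (items : List (Int × Int)) (fuel : Nat) (d : PySem.Set Int) :
    pvLoopA items fuel d [] = d := by cases fuel <;> rfl

lemma pvCnt_add (items : List (Int × Int)) (d : PySem.Set Int) (u : Int)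
    (h : PySem.Set.contains d u = false) :
    pvCnt items (PySem.Set.add d u)
      + (items.filter (fun p => p.2 == u)).length = pvCnt items d := by
  have hmem : u ∉ d := by simpa [PySem.Set.contains_eq_listContains] using h
  induction items with
  | nil => simp [pvCnt]
  | cons p t ih =>
    by_cases hu : p.2 = u
    · simp [pvCnt, hu, hmem, PySem.Set.contains_eq_listContains] at ih ⊢
      omega
    · by_cases hc : p.2 ∈ d
      · simp [pvCnt, hu, hc, PySem.Set.contains_eq_listContains] at ih ⊢
        omega
      · simp [pvCnt, hu, hc, PySem.Set.contains_eq_listContains] at ih ⊢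
        omega

-- one whole level of A's queue processing, as a fold over the frontier
lemma pvLevelA (items : List (Int × Int)) :
    ∀ (frontier : List Int) (fx : Nat) (d : PySem.Set Int) (acc : List Int),
      pvLoopA items (frontier.length + fx) d (frontier ++ acc)
        = pvLoopA items fx (frontier.foldl (pvGA items) (d, acc)).1
            (frontier.foldl (pvGA items) (d, acc)).2 := by
  intro frontier
  induction frontier with
  | nil => intro fx d acc; simp
  | cons u rest ih =>
    intro fx d acc
    have hlen : (u :: rest).length + fx = (rest.length + fx) + 1 := by
      simp [List.length_cons]; omega
    rw [hlen]
    simp only [List.cons_append, List.foldl_cons, pvLoopA, pvGA]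
    by_cases hc : PySem.Set.contains d u
    · simp only [hc, if_true]; exact ih fx d acc
    · simp only [hc, Bool.false_eq_true, if_false, List.append_assoc]
      exact ih fx (PySem.Set.add d u) (acc ++ _)

-- the level fold preserves |next frontier| + unvisited-manager count
lemma pvLevelInv (items : List (Int × Int)) :
    ∀ (l : List Int) (d : PySem.Set Int) (acc : List Int),
      (l.foldl (pvGA items) (d, acc)).2.length + pvCnt items (l.foldl (pvGA items) (d, acc)).1
        = acc.length + pvCnt items d := by
  intro l
  induction l with
  | nil => intro d acc; rfl
  | cons u rest ih =>
    intro d acc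
    simp only [List.foldl_cons, pvGA]
    by_cases hc : PySem.Set.contains d u
    · simp only [hc, if_true]; exact ih d acc
    · simp only [hc, Bool.false_eq_true, if_false]
      have h1 := ih (PySem.Set.add d u) (acc ++ (items.filter (fun p => p.2 == u)).map (fun p => p.1))
      have h2 := pvCnt_add items d u (by simpa using hc)
      simp only [List.length_append, List.length_map] at h1 ⊢
      omega

-- A with exactly pvM fuel equals A with any fuel ≥ pvM
lemma pvLoopA_exact (items : List (Int × Int)) :
    ∀ (fuel : Nat) (d : PySem.Set Int) (q : List Int), pvM items d q ≤ fuel →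
      pvLoopA items fuel d q = pvLoopA items (pvM items d q) d q := by
  intro fuel
  induction fuel with
  | zero =>
    intro d q h
    cases q with
    | nil => simp [pvLoopA_nil]
    | cons u rest => exfalso; simp [pvM, List.length_cons] at h
  | succ f ih =>
    intro d q h
    cases q with
    | nil => simp [pvLoopA_nil]
    | cons u rest =>
      have hm : pvM items d (u :: rest) = (rest.length + pvCnt items d) + 1 := by
        simp [pvM, List.length_cons]; omega
      rw [hm]
      simp only [pvLoopA]
      by_cases hc : PySem.Set.contains d u
      · simp only [hc, if_true]
        have : pvM items d rest = rest.length + pvCnt items d := rfl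
        rw [← this, ih d rest (by omega)]
      · simp only [hc, Bool.false_eq_true, if_false]
        have h2 := pvCnt_add items d u (by simpa using hc)
        have hm2 : pvM items (PySem.Set.add d u)
            (rest ++ (items.filter (fun p => p.2 == u)).map (fun p => p.1))
            = rest.length + pvCnt items d := by
          simp only [pvM, List.length_append, List.length_map]
          omega
        rw [← hm2, ih _ _ (by omega)]

-- the dict lookup in B is A's scan of the items
lemma pvChildMap_getD (items : List (Int × Int)) (c : Int) :
    (pvChildMap items).getD c [] = (items.filter (fun p => p.2 == c)).map (fun p => p.1) := by
  have h : pvChildMap items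
      = (items.map Prod.swap).foldl (fun d p => d.modify p.1 [] (fun l => l ++ [p.2]))
          PySem.Dict.empty := by
    simp [pvChildMap, List.foldl_map, Prod.swap]
  rw [h, PySem.Dict.getD_foldl_modify_append]
  simp [List.filter_map, List.map_map, Function.comp_def, Prod.swap]

lemma pvLevelStep_eq_foldl (items : List (Int × Int)) (d : PySem.Set Int) (frontier : List Int) :
    pvLevelStep (pvChildMap items) d frontier = frontier.foldl (pvGA items) (d, []) := by
  unfold pvLevelStep
  congr 1
  funext st u
  rw [pvGA, pvChildMap_getD]

-- B's level loop equals A's queue loop run with exactly pvM fuel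
lemma pvMain (items : List (Int × Int)) :
    ∀ (fuelB : Nat) (d : PySem.Set Int) (frontier : List Int),
      pvM items d frontier ≤ fuelB →
      pvLevels (pvChildMap items) fuelB d frontier
        = pvLoopA items (pvM items d frontier) d frontier := by
  intro fuelB
  induction fuelB with
  | zero =>
    intro d frontier h
    cases frontier with
    | nil => simp [pvLevels, pvLoopA_nil]
    | cons u rest => exfalso; simp [pvM, List.length_cons] at h
  | succ f ih =>
    intro d frontier h
    cases frontier with
    | nil => simp [pvLevels, pvLoopA_nil]
    | cons u rest =>
      have hA := pvLevelA items (u :: rest) (pvCnt items d) d []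
      simp only [List.append_nil] at hA
      have hinv := pvLevelInv items (u :: rest) d []
      simp only [List.length_nil] at hinv
      have hmr : pvM items ((u :: rest).foldl (pvGA items) (d, [])).1
          ((u :: rest).foldl (pvGA items) (d, [])).2 = pvCnt items d := by
        simp only [pvM]; omega
      have h' : rest.length + 1 + pvCnt items d ≤ f + 1 := by
        have hpm : pvM items d (u :: rest) = rest.length + 1 + pvCnt items d := by
          simp [pvM, List.length_cons]
        omega
      have hle : pvM items ((u :: rest).foldl (pvGA items) (d, [])).1
          ((u :: rest).foldl (pvGA items) (d, [])).2 ≤ f := by rw [hmr]; omega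
      have hpm2 : pvM items d (u :: rest) = (u :: rest).length + pvCnt items d := rfl
      simp only [pvLevels, pvLevelStep_eq_foldl]
      rw [ih _ _ hle, hmr, hpm2, hA]

-- |items of ofList| ≤ |input list| (insert either rewrites in place or appends one)
lemma pvItems_foldl_insert_le (l : List (Int × Int)) :
    ∀ (d : PySem.Dict Int Int),
      (l.foldl (fun acc p => acc.insert p.1 p.2) d).items.length ≤ d.items.length + l.length := by
  induction l with
  | nil => intro d; simp
  | cons p t ih =>
    intro d
    simp only [List.foldl_cons]
    refine le_trans (ih _) ?_
    rw [PySem.Dict.items_insert]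
    by_cases hc : d.contains p.1
    · simp [hc]
    · simp [hc]
      omega

lemma pvCnt_empty (items : List (Int × Int)) :
    pvCnt items PySem.Set.empty = items.length := by
  simp [pvCnt, PySem.Set.empty, PySem.Set.contains_eq_listContains]

-- ===== VERDICT (by name: the statement is the Claim_ definition above) =====
theorem collect_legacy_branch_descendants_py_spec : Claim_equal_collect_legacy_branch_descendants_py := by
  intro user_managers root_user_id _
  unfold Spec_collect_legacy_branch_descendants_py
  unfold collect_legacy_branch_descendants_py collect_legacy_branch_descendants_py_alt
  have hlen : (PySem.Dict.ofList user_managers).items.length ≤ user_managers.length := by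
    have h0 := pvItems_foldl_insert_le user_managers PySem.Dict.empty
    simpa [PySem.Dict.ofList, PySem.Dict.update, PySem.Dict.empty] using h0
  have hm : pvM (PySem.Dict.ofList user_managers).items PySem.Set.empty [root_user_id]
      = (PySem.Dict.ofList user_managers).items.length + 1 := by
    unfold pvM
    rw [pvCnt_empty]
    simp [List.length_cons]
    omega
  rw [pvLoopA_exact _ _ _ _ (by rw [hm]; omega),
      pvMain _ _ _ _ (by rw [hm]; omega)]
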